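-- pv_equiv track=rewrite | github.com/daniel-reich/turbo-robot | HaMCeHeJkaWvMg7LS_3.py | sun_loungers
-- ===== SOURCE A (Python) =====
-- def sun_loungers(beach):
--     count = 0
--     beach = list(beach)
--     if beach == ["0"]:
--         return 1
--     if beach[:2] == ["0", "0"]:
--         beach[0] = "1"
--         count += 1
--     if beach[-2:] == ["0", "0"]:
--         beach[-1] = "1"
--         count += 1
--     for i in range(1, len(beach) - 2):
--         if beach[i - 1 : i + 2] == ["0", "0", "0"]:
--             count += 1
--             beach[i - 1 : i + 2] = ["0", "1", "0"]
--
--     return count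
-- ===== SOURCE B (Python) =====
-- def sun_loungers(beach):
--     runs = []
--     cur = 0
--     for s in beach:
--         if s == "0":
--             cur += 1
--         else:
--             runs.append(cur)
--             cur = 0
--     if not runs:
--         return (cur + 1) // 2
--     total = runs[0] // 2 + cur // 2
--     for k in runs[1:]:
--         total += max(k - 1, 0) // 2
--     return total
-- ===== Notes on version B (the rewrite author's own statement) =====
-- stated objective: simpler
-- what changed: A simulates greedy placement by mutating the list (edge overwrites plus a sliding three-cell window splice); B never mutates: it splits the beach into maximal runs of "0" in one fold and sums a closed-form contribution per run (boundary runs k//2, interior runs (k-1)//2, all-zero beach (n+1)//2).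
import Mathlib
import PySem

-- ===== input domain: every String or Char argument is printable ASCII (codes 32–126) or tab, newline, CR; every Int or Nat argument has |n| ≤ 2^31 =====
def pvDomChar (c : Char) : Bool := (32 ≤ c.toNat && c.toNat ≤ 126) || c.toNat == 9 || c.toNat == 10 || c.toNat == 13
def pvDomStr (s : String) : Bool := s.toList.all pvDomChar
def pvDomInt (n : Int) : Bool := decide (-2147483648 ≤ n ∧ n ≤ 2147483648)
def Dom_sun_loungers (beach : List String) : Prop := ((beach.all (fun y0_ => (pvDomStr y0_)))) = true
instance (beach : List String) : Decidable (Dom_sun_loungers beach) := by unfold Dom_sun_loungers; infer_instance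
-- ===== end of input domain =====

-- B replaces A's mutating greedy window simulation by a one-pass split into maximal runs of "0"
-- summed with a closed form per run (objective: simpler; same return value, and B does not mutate its argument where A mutates a local copy only).


-- ===== PORT A =====
-- the for-loop: 'for i in range(1, len(beach)-2): if beach[i-1:i+2] == ["0","0","0"]: count += 1; beach[i-1:i+2] = ["0","1","0"]'
-- the slice assignment is ported by hand as take/++/drop, exact here because range(1, len-2) only yields i ≥ 1 (so i-1, i+2 ≥ 0)
def sunLoungersLoop : List String → Int → List Int → List String × Int
  | b, count, [] => (b, count)
  | b, count, i :: rest =>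
    if PySem.List.slice b (some (i - 1)) (some (i + 2)) = ["0", "0", "0"] then
      sunLoungersLoop (b.take (i - 1).toNat ++ ["0", "1", "0"] ++ b.drop (i + 2).toNat) (count + 1) rest
    else
      sunLoungersLoop b count rest

def sun_loungers (beach : List String) : Int :=
  let count : Int := 0
  if beach = ["0"] then 1
  else
    -- if beach[:2] == ["0","0"]: beach[0] = "1"; count += 1
    let p1 := if PySem.List.slice beach none (some 2) = ["0", "0"]
      then (beach.set 0 "1", count + 1) else (beach, count)
    -- if beach[-2:] == ["0","0"]: beach[-1] = "1"; count += 1   (index -1 = last element; ported as set (len-1))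
    let p2 := if PySem.List.slice p1.1 (some (-2)) none = ["0", "0"]
      then (p1.1.set (p1.1.length - 1) "1", p1.2 + 1) else p1
    (sunLoungersLoop p2.1 p2.2 (PySem.List.pyRange 1 ((p2.1.length : Int) - 2) 1)).2

-- ===== PORT B =====
def sun_loungers_alt (beach : List String) : Int :=
  let rc := beach.foldl
    (fun (p : List Int × Int) s => if s = "0" then (p.1, p.2 + 1) else (p.1 ++ [p.2], 0))
    ([], 0)
  match rc.1 with
  | [] => PySem.Int.floordiv (rc.2 + 1) 2
  | r0 :: rest =>
    rest.foldl (fun t k => t + PySem.Int.floordiv (max (k - 1) 0) 2)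
      (PySem.Int.floordiv r0 2 + PySem.Int.floordiv rc.2 2)

-- ===== PRECONDITION & SPEC =====
def Spec_sun_loungers (beach : List String) (out : Int) : Prop := out = sun_loungers_alt beach
instance (beach : List String) (out : Int) : Decidable (Spec_sun_loungers beach out) := by unfold Spec_sun_loungers; infer_instance

-- ===== CLAIM (what is proved, stated in full; the proofs are below) =====
def Claim_equal_sun_loungers : Prop := ∀ (beach : List String), Dom_sun_loungers beach → Spec_sun_loungers beach (sun_loungers beach)

-- ===== LEMMAS AND PROOFS =====

/-- `s` counts as a free spot. -/
def isZ (s : String) : Bool := s == "0"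

/-- Greedy weight of a run of `k` free spots whose cell before it is free (`true`) or blocked. -/
def wrun : Bool → Nat → Nat
  | true, k => k / 2
  | false, k => (k - 1) / 2

/-- Clean form of A's interior loop: walk the middle cells, `prev` = current value of the cell before. -/
def hgr : Bool → List String → Nat
  | prev, a :: bb :: rest =>
    if prev && isZ a && isZ bb then 1 + hgr false (bb :: rest) else hgr (isZ a) (bb :: rest)
  | _, _ => 0

/-- Lengths of the maximal runs of `"0"`, including empty runs at blockers (`#blockers + 1` entries). -/
def runsL : List String → List Nat
  | [] => [0]
  | s :: t => if isZ s then ((runsL t).headI + 1) :: (runsL t).tail else 0 :: runsL t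

def msumN (l : List Nat) : Nat := (l.map (fun k => (k - 1) / 2)).sum

def hsum (prev : Bool) (rr : List Nat) : Nat := wrun prev rr.headI + msumN rr.tail

/-- B's value as a function of the run lengths. -/
def BfN (rr : List Nat) : Nat :=
  if rr.tail = [] then (rr.headI + 1) / 2
  else rr.headI / 2 + rr.getLastD 0 / 2 + msumN rr.tail.dropLast

def modLast (l : List Nat) : List Nat := l.dropLast ++ [l.getLastD 0 + 1]

lemma runsL_cons (s : String) (t : List String) :
    runsL (s :: t) = if isZ s then ((runsL t).headI + 1) :: (runsL t).tail else 0 :: runsL t := rfl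

lemma cons_headI_tail {α : Type} [Inhabited α] (l : List α) (h : l ≠ []) :
    l.headI :: l.tail = l := by
  cases l with
  | nil => simp at h
  | cons a t => simp

lemma getLastD_of_ne_nil {α : Type} [Inhabited α] (l : List α) (d : α) (h : l ≠ []) :
    l.getLastD d = l.getLast h := by
  rw [List.getLastD_eq_getLast?, List.getLast?_eq_some_getLast h]; rfl

lemma drop_pred {α : Type} (l : List α) (h : l ≠ []) (y : α) :
    (l ++ [y]).drop (l.length - 1) = [l.getLast h, y] := by
  induction l with
  | nil => simp at h
  | cons b t ih =>
    cases t with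
    | nil => simp
    | cons c t' =>
      have := ih (by simp)
      simpa [List.getLast_cons] using this

lemma set_last {α : Type} (l : List α) (y v : α) : (l ++ [y]).set l.length v = l ++ [v] := by
  induction l with
  | nil => simp
  | cons a t ih => simp [ih]

lemma runsL_ne_nil (l : List String) : runsL l ≠ [] := by
  cases l with
  | nil => simp [runsL]
  | cons s t => simp only [runsL]; split <;> simp

lemma runsL_all_zero (l : List String) (h : ∀ s ∈ l, isZ s) : runsL l = [l.length] := by
  induction l with
  | nil => simp [runsL]
  | cons s t ih =>
    have hs : isZ s := h s (by simp)
    have ht : runsL t = [t.length] := ih (fun x hx => h x (by simp [hx]))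
    simp [runsL, hs, ht]

lemma runsL_split (zs : List String) (nz : String) (rest : List String)
    (hz : ∀ s ∈ zs, isZ s) (hn : ¬ isZ nz) :
    runsL (zs ++ nz :: rest) = zs.length :: runsL rest := by
  induction zs with
  | nil => simp [runsL, hn]
  | cons z zs' ih =>
    have hz' : isZ z := hz z (by simp)
    have := ih (fun x hx => hz x (by simp [hx]))
    simp [runsL, hz', this]

lemma runsL_singleton_all_zero (l : List String) (r : Nat) (h : runsL l = [r]) :
    ∀ s ∈ l, isZ s := by
  induction l generalizing r with
  | nil => simp
  | cons s t ih =>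
    by_cases hs : isZ s
    · simp only [runsL, hs, if_true] at h
      have htail : (runsL t).tail = [] := by
        cases hh : (runsL t).tail <;> simp [hh] at h ⊢
      have : runsL t = [(runsL t).headI] := by
        conv_lhs => rw [← cons_headI_tail (runsL t) (runsL_ne_nil t)]
        rw [htail]
      intro x hx
      rcases List.mem_cons.mp hx with h1 | h2
      · exact h1 ▸ hs
      · exact ih _ this x h2
    · simp only [runsL, hs, if_false, Bool.false_eq_true] at h
      exact absurd (List.cons.injEq _ _ _ _ ▸ h).2 (runsL_ne_nil t)

lemma getLastD_cons_of_ne_nil {α : Type} [Inhabited α] (a : α) (l : List α) (d : α)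
    (h : l ≠ []) : (a :: l).getLastD d = l.getLastD d := by
  rw [getLastD_of_ne_nil _ _ (by simp), getLastD_of_ne_nil _ _ h, List.getLast_cons h]

lemma modLast_cons (a : Nat) (l : List Nat) (h : l ≠ []) :
    modLast (a :: l) = a :: modLast l := by
  unfold modLast
  rw [List.dropLast_cons_of_ne_nil h, getLastD_cons_of_ne_nil _ _ _ h]
  simp

lemma runsL_append (l : List String) (y : String) :
    runsL (l ++ [y]) = if isZ y then modLast (runsL l) else runsL l ++ [0] := by
  induction l with
  | nil => by_cases hy : isZ y <;> simp [runsL, hy, modLast]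
  | cons s t ih =>
    have hne := runsL_ne_nil t
    obtain ⟨r, rt, hr⟩ : ∃ r rt, runsL t = r :: rt := by
      cases hh : runsL t with
      | nil => exact absurd hh hne
      | cons r rt => exact ⟨r, rt, rfl⟩
    rw [List.cons_append, runsL_cons, runsL_cons, ih]
    by_cases hy : isZ y <;> by_cases hs : isZ s <;>
        simp only [hy, hs, if_true, if_false, Bool.false_eq_true]
    · rw [hr]
      cases rt with
      | nil => simp [modLast]
      | cons q rt' =>
        rw [modLast_cons r (q :: rt') (by simp)]
        simp only [List.headI_cons, List.tail_cons]
        rw [modLast_cons (r + 1) (q :: rt') (by simp)]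
    · rw [modLast_cons 0 (runsL t) hne]
    · simp [hr]
    · simp

lemma runsL_head (a : String) (t : List String) :
    (runsL (a :: t)).headI ≠ 0 ↔ isZ a := by
  by_cases ha : isZ a <;> simp [runsL, ha]

lemma runsL_last (l : List String) (hl : l ≠ []) :
    (runsL l).getLastD 0 ≠ 0 ↔ isZ (l.getLast hl) := by
  induction l with
  | nil => simp at hl
  | cons s t ih =>
    cases t with
    | nil => by_cases hs : isZ s <;> simp [runsL, hs]
    | cons b t' =>
      have hne : (b :: t') ≠ ([] : List String) := by simp
      have hrne := runsL_ne_nil (b :: t')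
      obtain ⟨r, rt, hr⟩ : ∃ r rt, runsL (b :: t') = r :: rt := by
        cases hh : runsL (b :: t') with
        | nil => exact absurd hh hrne
        | cons r rt => exact ⟨r, rt, rfl⟩
      rw [List.getLast_cons hne, runsL_cons]
      by_cases hs : isZ s
      · rw [if_pos hs, hr]
        cases rt with
        | nil =>
          have hall := runsL_singleton_all_zero (b :: t') r hr
          have hz : isZ ((b :: t').getLast hne) := hall _ (List.getLast_mem hne)
          simp [hz]
        | cons q rt' =>
          have := ih hne
          rw [hr] at this
          rw [← this]
          simp only [List.headI_cons, List.tail_cons]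
          rw [getLastD_cons_of_ne_nil (r + 1) (q :: rt') 0 (by simp),
            getLastD_cons_of_ne_nil r (q :: rt') 0 (by simp)]
      · rw [if_neg (by simp [hs]), getLastD_cons_of_ne_nil _ _ _ hrne]
        exact ih hne

lemma hgr_all_zero (l : List String) (h : ∀ s ∈ l, isZ s) (prev : Bool) :
    hgr prev l = wrun prev l.length := by
  induction l generalizing prev with
  | nil => cases prev <;> simp [hgr, wrun]
  | cons a t ih =>
    cases t with
    | nil => cases prev <;> simp [hgr, wrun]
    | cons bb rest =>
      have ha : isZ a := h a (by simp)
      have hbb : isZ bb := h bb (by simp)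
      have ht : ∀ s ∈ bb :: rest, isZ s := fun x hx => h x (by simp at hx ⊢; tauto)
      cases prev
      · have e : hgr false (a :: bb :: rest) = hgr true (bb :: rest) := by simp [hgr, ha]
        rw [e, ih ht]
        simp only [wrun, List.length_cons]
        omega
      · have e : hgr true (a :: bb :: rest) = 1 + hgr false (bb :: rest) := by
          simp [hgr, ha, hbb]
        rw [e, ih ht]
        simp only [wrun, List.length_cons]
        omega

lemma hgr_split (zs : List String) (nz : String) (rest : List String)
    (hz : ∀ s ∈ zs, isZ s) (hn : ¬ isZ nz) (prev : Bool) :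
    hgr prev (zs ++ nz :: rest) = wrun prev zs.length + hgr false rest := by
  induction zs generalizing prev with
  | nil =>
    cases rest with
    | nil => cases prev <;> simp [hgr, wrun]
    | cons b r =>
      have e : hgr prev (nz :: b :: r) = hgr false (b :: r) := by
        simp [hgr, Bool.eq_false_iff.mpr hn]
      cases prev <;> simp [e, wrun]
  | cons z zs' ih =>
    have hz' : isZ z := hz z (by simp)
    have hzs' : ∀ s ∈ zs', isZ s := fun x hx => hz x (by simp [hx])
    cases zs' with
    | nil =>
      have e : hgr prev (z :: nz :: rest) = hgr true (nz :: rest) := by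
        simp [hgr, hz', Bool.eq_false_iff.mpr hn]
      have e2 := ih hzs' true
      simp only [List.nil_append] at e2
      simp only [List.cons_append, List.nil_append]
      rw [e, e2]
      cases prev <;> simp [wrun]
    | cons z2 zs'' =>
      have hz2 : isZ z2 := hz z2 (by simp)
      have hfalse := ih hzs' false
      have htrue := ih hzs' true
      simp only [List.cons_append] at hfalse htrue ⊢
      cases prev
      · have e : hgr false (z :: z2 :: (zs'' ++ nz :: rest)) = hgr true (z2 :: (zs'' ++ nz :: rest)) := by
          simp [hgr, hz']
        rw [e, htrue]
        simp only [wrun, List.length_cons]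
        omega
      · have e : hgr true (z :: z2 :: (zs'' ++ nz :: rest)) = 1 + hgr false (z2 :: (zs'' ++ nz :: rest)) := by
          simp [hgr, hz', hz2]
        rw [e, hfalse]
        simp only [wrun, List.length_cons]
        omega

lemma hgr_runs (l : List String) (prev : Bool) : hgr prev l = hsum prev (runsL l) := by
  induction hn : l.length using Nat.strong_induction_on generalizing l prev with
  | _ n ih =>
  by_cases hall : ∀ s ∈ l, isZ s
  · rw [hgr_all_zero l hall, runsL_all_zero l hall]
    simp [hsum, msumN]
  · cases hd : l.dropWhile isZ with
    | nil =>
      exfalso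
      apply hall
      intro x hx
      have : x ∈ l.takeWhile isZ := by
        rw [← List.takeWhile_append_dropWhile (p := isZ) (l := l), hd, List.append_nil] at hx
        exact hx
      exact List.mem_takeWhile_imp this
    | cons nz rest =>
      have hnz : ¬ isZ nz := by
        have := List.head?_dropWhile_not isZ l
        rw [hd] at this; simpa using this
      have hz : ∀ s ∈ l.takeWhile isZ, isZ s := fun x hx => List.mem_takeWhile_imp hx
      have hlen : rest.length < n := by
        have : (l.takeWhile isZ).length + (nz :: rest).length = l.length := by
          rw [← hd, ← List.length_append, List.takeWhile_append_dropWhile]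
        simp at this; omega
      conv_lhs => rw [← List.takeWhile_append_dropWhile (p := isZ) (l := l), hd]
      conv_rhs => rw [← List.takeWhile_append_dropWhile (p := isZ) (l := l), hd]
      rw [hgr_split _ _ _ hz hnz, runsL_split _ _ _ hz hnz]
      rw [ih rest.length hlen rest false rfl]
      have hrne := runsL_ne_nil rest
      obtain ⟨r, rt, hr⟩ : ∃ r rt, runsL rest = r :: rt := by
        cases hh : runsL rest with
        | nil => exact absurd hh hrne
        | cons r rt => exact ⟨r, rt, rfl⟩
      rw [hr]
      simp [hsum, msumN, wrun]

-- A-side: the interior loop computes `hgr` of the middle cells.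
lemma loop_eq_hgr (tail : List String) :
    ∀ (front : List String) (p lastE : String) (c : Int),
    (sunLoungersLoop (front ++ p :: tail ++ [lastE]) c
        (PySem.List.pyRange ((front.length : Int) + 1) ((front.length : Int) + tail.length) 1)).2
      = c + (hgr (isZ p) tail : Int) := by
  induction tail with
  | nil =>
    intro front p lastE c
    simp only [List.length_nil, Nat.cast_zero, add_zero]
    rw [PySem.List.pyRange_one_eq_nil (by omega)]
    simp [sunLoungersLoop, hgr]
  | cons a tail' ih =>
    intro front p lastE c
    cases tail' with
    | nil =>
      simp only [List.length_cons, List.length_nil, Nat.cast_one, Nat.cast_zero, zero_add]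
      rw [PySem.List.pyRange_one_eq_nil (by omega)]
      simp [sunLoungersLoop]
    | cons bb rest =>
      have hlt : ((front.length : Int) + 1) < (front.length : Int) + ((a :: bb :: rest).length : Int) := by
        simp only [List.length_cons]
        push_cast
        omega
      rw [PySem.List.pyRange_one_cons hlt]
      simp only [sunLoungersLoop]
      have e1 : ((front.length : Int) + 1) - 1 = ((front.length : Nat) : Int) := by push_cast; ring
      have e2 : ((front.length : Int) + 1) + 2 = (((front.length + 3 : Nat)) : Int) := by push_cast; ring
      have hsplit : front ++ p :: (a :: bb :: rest) ++ [lastE]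
          = front ++ (p :: a :: bb :: (rest ++ [lastE])) := by simp
      have hslice : PySem.List.slice (front ++ p :: (a :: bb :: rest) ++ [lastE])
          (some ((front.length : Int) + 1 - 1)) (some ((front.length : Int) + 1 + 2)) = [p, a, bb] := by
        rw [e1, e2, PySem.List.slice_natCast, hsplit, List.drop_left]
        have e3 : front.length + 3 - front.length = 3 := by omega
        rw [e3]
        rfl
      rw [hslice]
      have hrange : PySem.List.pyRange ((front.length : Int) + 1 + 1)
            ((front.length : Int) + ((a :: bb :: rest).length : Int)) 1
          = PySem.List.pyRange (((front ++ [p]).length : Int) + 1)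
            (((front ++ [p]).length : Int) + (((bb :: rest) : List String).length : Int)) 1 := by
        congr 1 <;> (simp only [List.length_append, List.length_cons, List.length_nil]; push_cast; ring)
      by_cases hcond : ([p, a, bb] = ["0", "0", "0"])
      · rw [if_pos hcond]
        obtain ⟨hp, ha, hbb⟩ : p = "0" ∧ a = "0" ∧ bb = "0" := by
          simpa using hcond
        subst hp ha hbb
        have etake : (((front.length : Int) + 1 - 1)).toNat = front.length := by omega
        have edrop : (((front.length : Int) + 1 + 2)).toNat = front.length + 3 := by omega
        rw [etake, edrop, hsplit]
        rw [show front ++ ("0" :: "0" :: "0" :: (rest ++ [lastE])) = front ++ ("0" :: "0" :: "0" :: rest ++ [lastE]) from by simp]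
        rw [List.take_left, List.drop_length_add_append 3 (l₁ := front)]
        have hb' : front ++ ["0", "1", "0"] ++ ("0" :: "0" :: "0" :: rest ++ [lastE]).drop 3
            = (front ++ ["0"]) ++ "1" :: ("0" :: rest) ++ [lastE] := by simp
        rw [hb', hrange, ih (front ++ ["0"]) "1" lastE (c + 1)]
        have hh : hgr (isZ ("0" : String)) ("0" :: "0" :: rest) = 1 + hgr false ("0" :: rest) := by
          simp [hgr, isZ]
        rw [hh]
        have : isZ ("1" : String) = false := by decide
        rw [this]
        push_cast
        ring
      · rw [if_neg hcond]
        have hb' : front ++ p :: (a :: bb :: rest) ++ [lastE]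
            = (front ++ [p]) ++ a :: (bb :: rest) ++ [lastE] := by simp
        rw [hb', hrange, ih (front ++ [p]) a lastE c]
        have hh : hgr (isZ p) (a :: bb :: rest) = hgr (isZ a) (bb :: rest) := by
          have : (isZ p && isZ a && isZ bb) = false := by
            simp only [List.cons.injEq, and_true] at hcond
            by_cases hp : p = "0" <;> by_cases ha2 : a = "0" <;> by_cases hb : bb = "0" <;>
              simp [isZ, hp, ha2, hb] at hcond ⊢ <;> tauto
          simp [hgr, this]
        rw [hh]

lemma sun_loungers_pair (x y : String) :
    sun_loungers [x, y] = if isZ x && isZ y then 1 else 0 := by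
  by_cases hx : x = "0" <;> by_cases hy : y = "0"
  · subst hx; subst hy; decide
  all_goals
    simp [sun_loungers, sunLoungersLoop, PySem.List.slice, PySem.List.pyRange,
      PySem.List.clampIdx, isZ, hx, hy]

lemma sun_loungers_main (x a : String) (mid' : List String) (y : String) :
    sun_loungers (x :: (a :: mid') ++ [y])
      = ((if isZ x && isZ a then 1 else 0)
         + (if isZ ((a :: mid').getLast (by simp)) && isZ y then 1 else 0)
         + hgr (isZ x && !(isZ x && isZ a)) (a :: mid') : Nat) := by
  have hne1 : (x :: a :: (mid' ++ [y])) ≠ ["0"] := by simp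
  show sun_loungers ((x :: a :: mid') ++ [y]) = _
  rw [show ((x :: a :: mid') ++ [y]) = x :: a :: (mid' ++ [y]) from by simp]
  simp only [sun_loungers]
  rw [if_neg hne1]
  have h1 : PySem.List.slice (x :: a :: (mid' ++ [y])) none (some 2) = [x, a] := by
    rw [PySem.List.slice_to _ (b := 2) (by norm_num)]
    rfl
  rw [h1]
  by_cases h1c : ([x, a] : List String) = ["0", "0"]
  · obtain ⟨hx, ha⟩ : x = "0" ∧ a = "0" := by simpa using h1c
    rw [if_pos h1c]
    simp only [List.set_cons_zero]
    have h2 : PySem.List.slice ("1" :: a :: (mid' ++ [y])) (some (-2)) none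
        = [(a :: mid').getLast (by simp), y] := by
      rw [PySem.List.slice_from_neg_ofNat _ 2 (by omega)]
      rw [show ("1" :: a :: (mid' ++ [y])) = ("1" :: a :: mid') ++ [y] from by simp]
      have e : ((("1" :: a :: mid') ++ [y]) : List String).length - 2
          = ("1" :: a :: mid').length - 1 := by simp
      rw [e, drop_pred ("1" :: a :: mid') (by simp) y]
      rw [List.getLast_cons (by simp)]
    rw [h2]
    by_cases h2c : ([(a :: mid').getLast (by simp), y] : List String) = ["0", "0"]
    · rw [if_pos h2c]
      obtain ⟨hgl0, hy⟩ : (a :: mid').getLast (by simp) = "0" ∧ y = "0" := by simpa using h2c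
      simp only []
      have hset : ("1" :: a :: (mid' ++ [y])).set (("1" :: a :: (mid' ++ [y])).length - 1) "1"
          = "1" :: a :: (mid' ++ ["1"]) := by
        rw [show ("1" :: a :: (mid' ++ [y])) = ("1" :: a :: mid') ++ [y] from by simp]
        rw [show ((("1" :: a :: mid') ++ [y]) : List String).length - 1 = ("1" :: a :: mid').length from by simp]
        rw [set_last]
        simp
      rw [hset]
      have hr : PySem.List.pyRange 1 (((("1" :: a :: (mid' ++ ["1"])) : List String).length : Int) - 2) 1
          = PySem.List.pyRange ((((([] : List String)).length : Int)) + 1)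
              (((([] : List String)).length : Int) + (((a :: mid') : List String).length : Int)) 1 := by
        congr 1 <;> (simp only [List.length_append, List.length_cons, List.length_nil,
          List.nil_append]; push_cast; omega)
      rw [hr, show ("1" :: a :: (mid' ++ ["1"]) : List String) = [] ++ "1" :: (a :: mid') ++ ["1"] from by simp,
        loop_eq_hgr (a :: mid') [] "1" "1" (0 + 1 + 1)]
      have heL : (isZ x && isZ a) = true := by simp [isZ, hx, ha]
      rw [heL]
      have hprev : isZ ("1" : String) = false := by decide
      rw [hprev]
      simp [isZ, hgl0, hy]
    · rw [if_neg h2c]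
      simp only []
      have hr : PySem.List.pyRange 1 (((("1" :: a :: (mid' ++ [y])) : List String).length : Int) - 2) 1
          = PySem.List.pyRange ((((([] : List String)).length : Int)) + 1)
              (((([] : List String)).length : Int) + (((a :: mid') : List String).length : Int)) 1 := by
        congr 1 <;> (simp only [List.length_append, List.length_cons, List.length_nil,
          List.nil_append]; push_cast; omega)
      rw [hr, show ("1" :: a :: (mid' ++ [y]) : List String) = [] ++ "1" :: (a :: mid') ++ [y] from by simp,
        loop_eq_hgr (a :: mid') [] "1" y (0 + 1)]
      have heL : (isZ x && isZ a) = true := by simp [isZ, hx, ha]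
      rw [heL]
      have hprev : isZ ("1" : String) = false := by decide
      rw [hprev]
      have heR : (isZ ((a :: mid').getLast (by simp)) && isZ y) = false := by
        simp only [isZ]
        by_cases hgl0 : (a :: mid').getLast (by simp) = "0" <;> by_cases hy : y = "0" <;>
          simp [hgl0, hy] at h2c ⊢
      rw [heR]
      simp
  · rw [if_neg h1c]
    simp only []
    have h2 : PySem.List.slice (x :: a :: (mid' ++ [y])) (some (-2)) none
        = [(a :: mid').getLast (by simp), y] := by
      rw [PySem.List.slice_from_neg_ofNat _ 2 (by omega)]
      rw [show (x :: a :: (mid' ++ [y])) = (x :: a :: mid') ++ [y] from by simp]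
      have e : (((x :: a :: mid') ++ [y]) : List String).length - 2
          = (x :: a :: mid').length - 1 := by simp
      rw [e, drop_pred (x :: a :: mid') (by simp) y]
      rw [List.getLast_cons (by simp)]
    rw [h2]
    have heL : (isZ x && isZ a) = false := by
      simp only [isZ]
      by_cases hx : x = "0" <;> by_cases ha : a = "0" <;> simp [hx, ha] at h1c ⊢
    by_cases h2c : ([(a :: mid').getLast (by simp), y] : List String) = ["0", "0"]
    · rw [if_pos h2c]
      obtain ⟨hgl0, hy⟩ : (a :: mid').getLast (by simp) = "0" ∧ y = "0" := by simpa using h2c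
      simp only []
      have hset : (x :: a :: (mid' ++ [y])).set ((x :: a :: (mid' ++ [y])).length - 1) "1"
          = x :: a :: (mid' ++ ["1"]) := by
        rw [show (x :: a :: (mid' ++ [y])) = (x :: a :: mid') ++ [y] from by simp]
        rw [show (((x :: a :: mid') ++ [y]) : List String).length - 1 = (x :: a :: mid').length from by simp]
        rw [set_last]
        simp
      rw [hset]
      have hr : PySem.List.pyRange 1 ((((x :: a :: (mid' ++ ["1"])) : List String).length : Int) - 2) 1
          = PySem.List.pyRange ((((([] : List String)).length : Int)) + 1)
              (((([] : List String)).length : Int) + (((a :: mid') : List String).length : Int)) 1 := by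
        congr 1 <;> (simp only [List.length_append, List.length_cons, List.length_nil,
          List.nil_append]; push_cast; omega)
      rw [hr, show (x :: a :: (mid' ++ ["1"]) : List String) = [] ++ x :: (a :: mid') ++ ["1"] from by simp,
        loop_eq_hgr (a :: mid') [] x "1" (0 + 1)]
      rw [heL]
      simp [isZ, hgl0, hy]
    · rw [if_neg h2c]
      simp only []
      have hr : PySem.List.pyRange 1 ((((x :: a :: (mid' ++ [y])) : List String).length : Int) - 2) 1
          = PySem.List.pyRange ((((([] : List String)).length : Int)) + 1)
              (((([] : List String)).length : Int) + (((a :: mid') : List String).length : Int)) 1 := by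
        congr 1 <;> (simp only [List.length_append, List.length_cons, List.length_nil,
          List.nil_append]; push_cast; omega)
      rw [hr, show (x :: a :: (mid' ++ [y]) : List String) = [] ++ x :: (a :: mid') ++ [y] from by simp,
        loop_eq_hgr (a :: mid') [] x y 0]
      rw [heL]
      have heR : (isZ ((a :: mid').getLast (by simp)) && isZ y) = false := by
        simp only [isZ]
        by_cases hgl0 : (a :: mid').getLast (by simp) = "0" <;> by_cases hy : y = "0" <;>
          simp [hgl0, hy] at h2c ⊢
      rw [heR]
      simp

-- B-side: the fold computes the run lengths.
lemma map_cast_runs (t : List String) :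
    (runsL t).map (Nat.cast : Nat → Int)
      = ((runsL t).headI : Int) :: (runsL t).tail.map (Nat.cast : Nat → Int) := by
  conv_lhs => rw [← cons_headI_tail (runsL t) (runsL_ne_nil t)]
  simp

lemma foldl_runs (l : List String) :
    ∀ (rs : List Int) (c : Int),
    l.foldl (fun (p : List Int × Int) s => if s = "0" then (p.1, p.2 + 1) else (p.1 ++ [p.2], 0)) (rs, c)
      = (rs ++ ((c + ((runsL l).headI : Int)) :: (runsL l).tail.map (Nat.cast : Nat → Int)).dropLast,
         ((c + ((runsL l).headI : Int)) :: (runsL l).tail.map (Nat.cast : Nat → Int)).getLastD 0) := by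
  induction l with
  | nil => intro rs c; simp [runsL]
  | cons s t ih =>
    intro rs c
    by_cases hs : s = "0"
    · simp only [List.foldl_cons, if_pos hs]
      rw [ih]
      have hr : runsL (s :: t) = ((runsL t).headI + 1) :: (runsL t).tail := by
        simp [runsL_cons, isZ, hs]
      rw [hr]
      simp only [List.headI_cons, List.tail_cons]
      have e : c + (((runsL t).headI + 1 : Nat) : Int) = c + 1 + ((runsL t).headI : Int) := by
        push_cast; ring
      rw [e]
    · simp only [List.foldl_cons, if_neg hs]
      rw [ih]
      have hr : runsL (s :: t) = 0 :: runsL t := by simp [runsL_cons, isZ, hs]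
      rw [hr]
      simp only [List.headI_cons, List.tail_cons]
      have hne : (runsL t).map (Nat.cast : Nat → Int) ≠ [] := by
        simp [runsL_ne_nil t]
      rw [map_cast_runs t]
      simp only [Nat.cast_zero, zero_add, add_zero]
      rw [getLastD_cons_of_ne_nil c _ 0 (by simp),
        List.dropLast_cons_of_ne_nil (l := ((runsL t).headI : Int) :: (runsL t).tail.map Nat.cast) (by simp)]
      simp

lemma fd_max_cast (k : Nat) :
    PySem.Int.floordiv (max ((k : Int) - 1) 0) 2 = (((k - 1) / 2 : Nat) : Int) := by
  cases k with
  | zero => simp [PySem.Int.floordiv]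
  | succ m =>
    have e : max ((((m : Nat) + 1 : Nat) : Int) - 1) 0 = ((m : Nat) : Int) := by push_cast; omega
    rw [e]
    exact_mod_cast PySem.Int.floordiv_natCast m 2

lemma alt_eq_BfN (beach : List String) : sun_loungers_alt beach = (BfN (runsL beach) : Int) := by
  unfold sun_loungers_alt
  rw [foldl_runs beach [] 0]
  obtain ⟨q0, qt, hq⟩ : ∃ q0 qt, runsL beach = q0 :: qt := by
    cases hh : runsL beach with
    | nil => exact absurd hh (runsL_ne_nil beach)
    | cons q0 qt => exact ⟨q0, qt, rfl⟩
  rw [hq]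
  cases qt with
  | nil =>
    simp only [List.tail_cons, List.headI_cons, List.map_nil, List.nil_append, zero_add,
      List.dropLast, List.getLastD, List.getLast_singleton]
    have e1 : (q0 : Int) + 1 = ((q0 + 1 : Nat) : Int) := by push_cast; ring
    have e2 : PySem.Int.floordiv (((q0 + 1 : Nat) : Int)) 2 = (((q0 + 1) / 2 : Nat) : Int) := by
      exact_mod_cast PySem.Int.floordiv_natCast (q0 + 1) 2
    rw [e1, e2]
    simp [BfN]
  | cons q1 qt' =>
    simp only [List.tail_cons, List.headI_cons, zero_add, List.nil_append]
    have hmne : (q1 :: qt').map (Nat.cast : Nat → Int) ≠ [] := by simp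
    rw [List.dropLast_cons_of_ne_nil hmne, getLastD_cons_of_ne_nil _ _ _ hmne]
    simp only []
    rw [PySem.List.foldl_add (g := fun k => PySem.Int.floordiv (max (k - 1) 0) 2)]
    have hmap : ((q1 :: qt').map (Nat.cast : Nat → Int)).dropLast.map
        (fun k => PySem.Int.floordiv (max (k - 1) 0) 2)
        = ((q1 :: qt').dropLast.map (fun k => (((k - 1) / 2 : Nat) : Int))) := by
      rw [← List.map_dropLast]
      rw [List.map_map]
      exact List.map_congr_left (fun k _ => fd_max_cast k)
    have hlast : ((q1 :: qt').map (Nat.cast : Nat → Int)).getLastD 0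
        = (((q1 :: qt').getLastD 0 : Nat) : Int) := by
      rw [getLastD_of_ne_nil _ _ (by simp), getLastD_of_ne_nil _ _ (by simp), List.getLast_map]
    have e1 : PySem.Int.floordiv ((q0 : Nat) : Int) 2 = (((q0 / 2 : Nat)) : Int) := by
      exact_mod_cast PySem.Int.floordiv_natCast q0 2
    have e2 : PySem.Int.floordiv ((((q1 :: qt').getLastD 0 : Nat)) : Int) 2
        = ((((q1 :: qt').getLastD 0 / 2 : Nat)) : Int) := by
      exact_mod_cast PySem.Int.floordiv_natCast ((q1 :: qt').getLastD 0) 2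
    rw [hmap, hlast, e1, e2]
    have hBfN : BfN (q0 :: q1 :: qt')
        = q0 / 2 + (q1 :: qt').getLastD 0 / 2 + msumN ((q1 :: qt').dropLast) := by
      simp only [BfN, List.tail_cons, List.headI_cons]
      rw [if_neg (by simp)]
      rw [getLastD_cons_of_ne_nil _ _ _ (by simp)]
    rw [hBfN]
    unfold msumN
    push_cast
    rw [List.map_map]
    congr 1

lemma msumN_cons (k : Nat) (l : List Nat) : msumN (k :: l) = (k - 1) / 2 + msumN l := by
  simp [msumN]

lemma msumN_append (l : List Nat) (k : Nat) : msumN (l ++ [k]) = msumN l + (k - 1) / 2 := by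
  simp [msumN]

lemma msumN_decomp (l : List Nat) (h : l ≠ []) :
    msumN l = msumN l.dropLast + (l.getLastD 0 - 1) / 2 := by
  conv_lhs => rw [← List.dropLast_concat_getLast h]
  rw [msumN_append, getLastD_of_ne_nil _ _ h]

lemma BfN_single (c : Nat) : BfN [c] = (c + 1) / 2 := by
  simp [BfN]

lemma BfN_concat (c k : Nat) (dl : List Nat) :
    BfN (c :: (dl ++ [k])) = c / 2 + k / 2 + msumN dl := by
  simp only [BfN, List.tail_cons, List.headI_cons]
  rw [if_neg (by simp), getLastD_cons_of_ne_nil _ _ _ (by simp)]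
  rw [getLastD_of_ne_nil _ _ (by simp), List.getLast_append, List.dropLast_concat]
  simp

lemma hsum_cons (p : Bool) (k : Nat) (l : List Nat) :
    hsum p (k :: l) = wrun p k + msumN l := by
  simp [hsum]

-- run-level identity joining the two sides (mid nonempty, beach = x :: mid ++ [y])
lemma key_identity (x : String) (mid : List String) (y : String) (hm : mid ≠ []) :
    BfN (runsL (x :: mid ++ [y]))
      = (if isZ x && isZ (mid.headI) then 1 else 0)
        + (if isZ (mid.getLast hm) && isZ y then 1 else 0)
        + hsum (isZ x && !(isZ x && isZ (mid.headI))) (runsL mid) := by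
  rcases mid with _ | ⟨a, mid''⟩
  · exact absurd rfl hm
  obtain ⟨r, rt, hr⟩ : ∃ r rt, runsL (a :: mid'') = r :: rt := by
    cases hh : runsL (a :: mid'') with
    | nil => exact absurd hh (runsL_ne_nil _)
    | cons r rt => exact ⟨r, rt, rfl⟩
  have har : r ≠ 0 ↔ isZ a = true := by
    have h := runsL_head a mid''
    rw [hr] at h
    simpa using h
  have hlast0 : (r :: rt).getLastD 0 ≠ 0 ↔ isZ ((a :: mid'').getLast (by simp)) = true := by
    have h := runsL_last (a :: mid'') (by simp)
    rw [hr] at h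
    exact h
  have hL : (x :: (a :: mid'') ++ [y]) = x :: ((a :: mid'') ++ [y]) := by simp
  rw [hL, runsL_cons, runsL_append, hr]
  simp only [List.headI_cons]
  by_cases hx : isZ x <;> by_cases hy : isZ y <;> by_cases ha : isZ a <;>
    simp only [hx, hy, ha, if_true, if_false, Bool.false_eq_true, Bool.true_and,
      Bool.false_and, Bool.and_true, Bool.and_false, Bool.not_true, Bool.not_false,
      Bool.and_self, and_true, and_false, true_and, false_and]
  · -- x = "0", y = "0", a = "0"
    have hrne : r ≠ 0 := har.mpr ha
    by_cases hz : isZ ((a :: mid'').getLast hm) = true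
    · rw [if_pos hz]
      have hLne : (r :: rt).getLastD 0 ≠ 0 := hlast0.mpr hz
      cases rt with
      | nil =>
        rw [show modLast [r] = [r + 1] from rfl]
        simp only [List.headI_cons, List.tail_cons]
        rw [BfN_single, hsum_cons]
        simp only [wrun, msumN, List.map_nil, List.sum_nil]
        omega
      | cons q rt' =>
        have hml : modLast (r :: q :: rt')
            = r :: ((q :: rt').dropLast ++ [(q :: rt').getLastD 0 + 1]) := by
          rw [modLast_cons r (q :: rt') (by simp)]; rfl
        rw [hml]
        simp only [List.headI_cons, List.tail_cons]
        rw [BfN_concat, hsum_cons, msumN_decomp (q :: rt') (by simp)]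
        rw [getLastD_cons_of_ne_nil _ _ _ (by simp)] at hLne
        simp only [wrun]
        omega
    · rw [if_neg hz]
      have hLeq : (r :: rt).getLastD 0 = 0 := by
        by_contra hc; exact hz (hlast0.mp hc)
      cases rt with
      | nil =>
        have : r = 0 := by simpa using hLeq
        omega
      | cons q rt' =>
        have hml : modLast (r :: q :: rt')
            = r :: ((q :: rt').dropLast ++ [(q :: rt').getLastD 0 + 1]) := by
          rw [modLast_cons r (q :: rt') (by simp)]; rfl
        rw [hml]
        simp only [List.headI_cons, List.tail_cons]
        rw [BfN_concat, hsum_cons, msumN_decomp (q :: rt') (by simp)]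
        rw [getLastD_cons_of_ne_nil _ _ _ (by simp)] at hLeq
        simp only [wrun]
        omega
  · -- x = "0", y = "0", a ≠ "0"  (then r = 0 and rt ≠ [])
    have hre : r = 0 := by by_contra hc; exact ha (har.mp hc)
    by_cases hz : isZ ((a :: mid'').getLast hm) = true
    · rw [if_pos hz]
      have hLne : (r :: rt).getLastD 0 ≠ 0 := hlast0.mpr hz
      cases rt with
      | nil =>
        have hall := runsL_singleton_all_zero (a :: mid'') r hr
        exact absurd (hall a (by simp)) ha
      | cons q rt' =>
        have hml : modLast (r :: q :: rt')
            = r :: ((q :: rt').dropLast ++ [(q :: rt').getLastD 0 + 1]) := by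
          rw [modLast_cons r (q :: rt') (by simp)]; rfl
        rw [hml]
        simp only [List.headI_cons, List.tail_cons]
        rw [BfN_concat, hsum_cons, msumN_decomp (q :: rt') (by simp)]
        rw [getLastD_cons_of_ne_nil _ _ _ (by simp)] at hLne
        simp only [wrun]
        omega
    · rw [if_neg hz]
      have hLeq : (r :: rt).getLastD 0 = 0 := by
        by_contra hc; exact hz (hlast0.mp hc)
      cases rt with
      | nil =>
        have hall := runsL_singleton_all_zero (a :: mid'') r hr
        exact absurd (hall a (by simp)) ha
      | cons q rt' =>
        have hml : modLast (r :: q :: rt')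
            = r :: ((q :: rt').dropLast ++ [(q :: rt').getLastD 0 + 1]) := by
          rw [modLast_cons r (q :: rt') (by simp)]; rfl
        rw [hml]
        simp only [List.headI_cons, List.tail_cons]
        rw [BfN_concat, hsum_cons, msumN_decomp (q :: rt') (by simp)]
        rw [getLastD_cons_of_ne_nil _ _ _ (by simp)] at hLeq
        simp only [wrun]
        omega
  · -- x = "0", y ≠ "0", a = "0"
    have hrne : r ≠ 0 := har.mpr ha
    simp only [List.cons_append, List.headI_cons, List.tail_cons]
    rw [BfN_concat, hsum_cons]
    simp only [wrun, msumN, List.map_nil, List.sum_nil]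
    omega
  · -- x = "0", y ≠ "0", a ≠ "0"
    have hre : r = 0 := by by_contra hc; exact ha (har.mp hc)
    simp only [List.cons_append, List.headI_cons, List.tail_cons]
    rw [BfN_concat, hsum_cons]
    subst hre
    simp only [wrun, msumN, List.map_nil, List.sum_nil]
    omega
  · -- x ≠ "0", y = "0", a = "0"
    have hml : modLast (r :: rt) = (r :: rt).dropLast ++ [(r :: rt).getLastD 0 + 1] := rfl
    have e1 := msumN_decomp (r :: rt) (by simp)
    have e2 := msumN_cons r rt
    rw [hml, BfN_concat, hsum_cons]
    by_cases hz : isZ ((a :: mid'').getLast hm) = true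
    · rw [if_pos hz]
      have hLne : (r :: rt).getLastD 0 ≠ 0 := hlast0.mpr hz
      simp only [wrun]
      omega
    · rw [if_neg hz]
      have hLeq : (r :: rt).getLastD 0 = 0 := by
        by_contra hc; exact hz (hlast0.mp hc)
      simp only [wrun]
      omega
  · -- x ≠ "0", y = "0", a ≠ "0"
    have hml : modLast (r :: rt) = (r :: rt).dropLast ++ [(r :: rt).getLastD 0 + 1] := rfl
    have e1 := msumN_decomp (r :: rt) (by simp)
    have e2 := msumN_cons r rt
    rw [hml, BfN_concat, hsum_cons]
    by_cases hz : isZ ((a :: mid'').getLast hm) = true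
    · rw [if_pos hz]
      have hLne : (r :: rt).getLastD 0 ≠ 0 := hlast0.mpr hz
      simp only [wrun]
      omega
    · rw [if_neg hz]
      have hLeq : (r :: rt).getLastD 0 = 0 := by
        by_contra hc; exact hz (hlast0.mp hc)
      simp only [wrun]
      omega
  · -- x ≠ "0", y ≠ "0", a = "0"
    rw [show ((0 : Nat) :: (r :: rt ++ [0]) : List Nat) = 0 :: ((r :: rt) ++ [0]) from by simp]
    rw [BfN_concat, hsum_cons, msumN_cons]
    simp [wrun]
  · -- x ≠ "0", y ≠ "0", a ≠ "0"
    rw [show ((0 : Nat) :: (r :: rt ++ [0]) : List Nat) = 0 :: ((r :: rt) ++ [0]) from by simp]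
    rw [BfN_concat, hsum_cons, msumN_cons]
    simp [wrun]

-- ===== VERDICT (by name: the statement is the Claim_ definition above) =====
theorem sun_loungers_spec : Claim_equal_sun_loungers := by
  intro beach _hdom
  unfold Spec_sun_loungers
  rw [alt_eq_BfN]
  rcases beach with _ | ⟨x, rest⟩
  · decide
  rcases rest with _ | ⟨s2, rest2⟩
  · by_cases hx : x = "0"
    · subst hx; decide
    · have hA : sun_loungers [x] = 0 := by
        simp [sun_loungers, sunLoungersLoop, PySem.List.slice, PySem.List.pyRange,
          PySem.List.clampIdx, hx]
      have hB : runsL [x] = [0, 0] := by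
        simp [runsL, isZ, hx]
      rw [hA, hB]
      decide
  rcases List.eq_nil_or_concat rest2 with h | ⟨mid'', y, h⟩
  · subst h
    rw [sun_loungers_pair]
    by_cases hx : x = "0" <;> by_cases hy : s2 = "0" <;>
      simp [runsL, isZ, hx, hy, BfN, msumN]
  · subst h
    simp only [List.concat_eq_append]
    rw [show (x :: s2 :: (mid'' ++ [y]) : List String) = (x :: s2 :: mid'') ++ [y] from by simp]
    rw [sun_loungers_main x s2 mid'' y]
    rw [key_identity x (s2 :: mid'') y (by simp)]
    rw [hgr_runs]
    simp only [List.headI_cons]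
    rfl
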